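-- pv_equiv track=rewrite | github.com/hy1203/codingtest | 프로그래머스/1/12947. 하샤드 수/하샤드 수.py | solution
-- ===== SOURCE A (Python) =====
-- def solution(x):
--     sum=0
--     num=x
--     while (x>0):
--         sum+= x%10
--         x //= 10
--     if(num%sum==0):
--             return True
--     else:
--             return False
-- ===== SOURCE B (Python) =====
-- def solution(x):
--     s = sum(int(d) for d in str(x))
--     return x % s == 0
-- ===== Notes on version B (the rewrite author's own statement) =====
-- stated objective: idiomatic
-- what changed: Digit sum computed by iterating over the characters of str(x) instead of an arithmetic while-loop of %10 / //=10 steps, and the boolean returned directly from the comparison instead of an if/else over True/False.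
import Mathlib
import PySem

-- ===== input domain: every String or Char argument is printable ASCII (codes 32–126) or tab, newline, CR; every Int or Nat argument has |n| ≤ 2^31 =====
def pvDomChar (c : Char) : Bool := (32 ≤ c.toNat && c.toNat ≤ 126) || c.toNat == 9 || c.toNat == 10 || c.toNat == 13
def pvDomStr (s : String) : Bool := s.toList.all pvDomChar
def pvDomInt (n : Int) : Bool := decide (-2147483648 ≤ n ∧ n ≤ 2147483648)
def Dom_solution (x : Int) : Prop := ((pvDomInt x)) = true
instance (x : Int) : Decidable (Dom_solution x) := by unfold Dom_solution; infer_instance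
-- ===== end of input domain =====

-- B computes the digit sum from the characters of str(x) instead of A's %10 // 10 while-loop;
-- same divisibility result for every x > 0 (for x ≤ 0 both Pythons raise); objective: idiomatic.


-- ===== PORT A =====
-- the while-loop: state is (x, sum); one %10 / //=10 step per iteration
def solutionLoop (x : Int) (sum : Int) : Int :=
  if _h : x > 0 then
    solutionLoop (PySem.Int.floordiv x 10) (sum + PySem.Int.mod x 10)
  else sum
termination_by x.toNat
decreasing_by
  have h10 : PySem.Int.floordiv x 10 = x / 10 := by
    simp [PySem.Int.floordiv, Int.fdiv_eq_ediv]
  rw [h10]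
  omega

def solution (x : Int) : Bool :=
  let sum := solutionLoop x 0
  let num := x
  if PySem.Int.mod num sum = 0 then true else false

-- ===== PORT B =====
-- int(d) for a single digit character d of str(x) (x > 0 ⇒ all characters are ASCII digits):
-- exact there, it is the character code minus 48
def solution_alt (x : Int) : Bool :=
  let s : Int := (((PySem.Int.toStr x).toList).map (fun c => (c.toNat : Int) - 48)).sum
  decide (PySem.Int.mod x s = 0)

-- ===== PRECONDITION & SPEC =====
-- A raises ZeroDivisionError for every x ≤ 0 (the loop never runs, sum stays 0)
def Pre_solution (x : Int) : Prop := 0 < x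
instance (x : Int) : Decidable (Pre_solution x) := by unfold Pre_solution; infer_instance
def pvWitness_solution : Int := (18)

def Spec_solution (x : Int) (out : Bool) : Prop := out = solution_alt x
instance (x : Int) (out : Bool) : Decidable (Spec_solution x out) := by unfold Spec_solution; infer_instance

-- ===== CLAIM (what is proved, stated in full; the proofs are below) =====
def Claim_equal_solution : Prop := ∀ (x : Int), Dom_solution x → Pre_solution x → Spec_solution x (solution x)

-- ===== LEMMAS AND PROOFS =====

-- the mathematical digit sum, on Nat
def digitSumN (n : Nat) : Int :=
  if n = 0 then 0 else ((n % 10 : Nat) : Int) + digitSumN (n / 10)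

lemma digitSumN_step (n : Nat) : digitSumN n = ((n % 10 : Nat) : Int) + digitSumN (n / 10) := by
  by_cases h : n = 0
  · subst h; simp [digitSumN]
  · rw [digitSumN]; simp [h]

-- A's loop computes sum + digit sum
lemma solutionLoop_eq (n : Nat) : ∀ (x sum : Int), x.toNat = n → 0 ≤ x →
    solutionLoop x sum = sum + digitSumN n := by
  induction n using Nat.strong_induction_on with
  | _ n ih =>
    intro x sum hx hx0
    rw [solutionLoop]
    by_cases hpos : x > 0
    · have hxn : x = (n : Int) := by omega
      subst hxn
      have hn : 0 < n := by exact_mod_cast hpos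
      have hfd : PySem.Int.floordiv (n : Int) 10 = ((n / 10 : Nat) : Int) := by
        simp only [PySem.Int.floordiv, Int.fdiv_eq_ediv]; omega
      have hfm : PySem.Int.mod (n : Int) 10 = ((n % 10 : Nat) : Int) := by
        simp only [PySem.Int.mod, Int.fmod_eq_emod]; omega
      rw [dif_pos hpos, hfd, hfm,
        ih (n / 10) (by omega) _ _ (by omega) (by positivity)]
      rw [digitSumN_step n]; ring
    · have hn : n = 0 := by omega
      rw [dif_neg hpos, hn]
      simp [digitSumN]

-- value of a digit character
lemma digitChar_toNat (d : Nat) (h : d < 10) : (Nat.digitChar d).toNat = 48 + d := by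
  interval_cases d <;> decide

def charSum (cs : List Char) : Int := (cs.map (fun c => (c.toNat : Int) - 48)).sum

lemma charSum_cons (c : Char) (cs : List Char) :
    charSum (c :: cs) = ((c.toNat : Int) - 48) + charSum cs := by
  simp [charSum]

-- the char-value sum of toDigitsCore is the digit sum (with enough fuel)
lemma toDigitsCore_charSum (fuel : Nat) : ∀ (n : Nat) (acc : List Char), n < fuel →
    charSum (Nat.toDigitsCore 10 fuel n acc) = digitSumN (n / 10) + ((n % 10 : Nat) : Int) + charSum acc := by
  induction fuel with
  | zero => intro n acc h; omega
  | succ fuel ih =>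
    intro n acc h
    rw [Nat.toDigitsCore]
    by_cases h0 : n / 10 = 0
    · rw [if_pos h0, charSum_cons, h0]
      have := digitChar_toNat (n % 10) (Nat.mod_lt _ (by norm_num))
      simp [this, digitSumN]
    · rw [if_neg h0]
      have hlt : n / 10 < fuel := by
        have : n / 10 < n := Nat.div_lt_self (by omega) (by norm_num)
        omega
      rw [ih (n / 10) _ hlt, charSum_cons]
      have := digitChar_toNat (n % 10) (Nat.mod_lt _ (by norm_num))
      rw [digitSumN_step (n / 10)]
      simp [this]
      ring

-- B's string digit sum equals the mathematical digit sum, for x > 0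
lemma strDigitSum_eq (x : Int) (hx : 0 < x) :
    (((PySem.Int.toStr x).toList).map (fun c => (c.toNat : Int) - 48)).sum = digitSumN x.toNat := by
  have hneg : ¬ x < 0 := by omega
  show charSum (PySem.Int.toStr x).toList = _
  rw [PySem.Int.toList_toStr]
  simp only [PySem.Int.toChars, if_neg hneg, Nat.toDigits]
  rw [toDigitsCore_charSum (x.toNat + 1) x.toNat [] (by omega)]
  rw [digitSumN_step x.toNat]
  simp [charSum]
  ring

-- ===== VERDICT (by name: the statement is the Claim_ definition above) =====
theorem solution_spec : Claim_equal_solution := by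
  intro x _hdom hpre
  have hx : 0 < x := hpre
  unfold Spec_solution solution solution_alt
  rw [strDigitSum_eq x hx,
    solutionLoop_eq x.toNat x 0 rfl (by omega)]
  simp
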